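-- pv_equiv track=rewrite | github.com/jcolinpatrick/kryptos | scripts/grille/blitz_grille_geometry_v3.py | autokey_vig_dec
-- ===== SOURCE A (Python) =====
-- AZ = "ABCDEFGHIJKLMNOPQRSTUVWXYZ"
--
-- def autokey_vig_dec(ct, seed, alpha=AZ):
--     """Autokey Vigenère decrypt: key extends with plaintext."""
--     n = len(alpha)
--     key = list(seed)
--     pt = []
--     for i, ch in enumerate(ct):
--         k = alpha.index(key[i])
--         c = alpha.index(ch)
--         p_char = alpha[(c - k) % n]
--         pt.append(p_char)
--         key.append(p_char)
--     return ''.join(pt[:len(ct)])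
-- ===== SOURCE B (Python) =====
-- AZ = "ABCDEFGHIJKLMNOPQRSTUVWXYZ"
--
-- def autokey_vig_dec(ct, seed, alpha=AZ):
--     """Closed-form autokey Vigenere decrypt: each plaintext letter is computed
--     directly from the input as an alternating telescoped sum of ciphertext
--     indices down its residue class mod len(seed), finished by the seed letter;
--     no recurrence, no growing key, no dependence on previously recovered text."""
--     n = len(alpha)
--     m = len(seed)
--     out = []
--     for i in range(len(ct)):
--         q, r = divmod(i, m)
--         total = 0
--         sign = 1
--         for j in range(q + 1):
--             total += sign * alpha.index(ct[i - j * m])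
--             sign = -sign
--         total += sign * alpha.index(seed[r])
--         out.append(alpha[total % n])
--     return ''.join(out)
-- ===== Notes on version B (the rewrite author's own statement) =====
-- stated objective: alternative
-- what changed: B replaces A's sequential recurrence (a growing key list fed back from the recovered plaintext) by a closed form: since key[i]=pt[i-m] telescopes, pt[i] is the alternating sum ct[i]-ct[i-m]+ct[i-2m]-...+/-seed[i%m] mod n, so B computes every output letter independently from ct and seed alone, with no recurrence and no state carried between positions; Pre_ excludes alphabets with repeated characters, on which A's alpha.index first-occurrence canonicalization of each recovered letter before feeding it back into the key is accidental and breaks the telescoping.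
-- outside the precondition, e.g. on autokey_vig_dec('CCA', 'AA', 'BCACA'): A returns 'AAB', B returns 'AAC'
import Mathlib
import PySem

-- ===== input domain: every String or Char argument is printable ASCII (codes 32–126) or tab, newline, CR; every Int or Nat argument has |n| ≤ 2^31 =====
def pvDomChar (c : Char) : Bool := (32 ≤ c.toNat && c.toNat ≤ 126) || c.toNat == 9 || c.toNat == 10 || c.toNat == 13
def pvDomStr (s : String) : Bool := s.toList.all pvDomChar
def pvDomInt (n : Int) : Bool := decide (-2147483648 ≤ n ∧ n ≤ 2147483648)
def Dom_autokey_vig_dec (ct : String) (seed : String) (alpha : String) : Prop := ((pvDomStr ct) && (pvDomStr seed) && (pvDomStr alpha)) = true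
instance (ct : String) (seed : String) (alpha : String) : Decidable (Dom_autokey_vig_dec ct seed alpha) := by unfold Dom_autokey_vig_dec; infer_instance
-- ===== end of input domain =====

-- B replaces A's sequential autokey recurrence (growing key list fed back from the output) by a
-- closed form: each plaintext letter is an alternating telescoped sum of ciphertext indices down
-- its residue class mod len(seed), finished by the seed letter — no state between positions.

-- ===== PORT A =====
-- A's loop: for i, ch in enumerate(ct): k = alpha.index(key[i]); c = alpha.index(ch);
-- p = alpha[(c-k)%n]; pt.append(p); key.append(p).  'none' = the step raises in Python.
def autokeyVigDecLoopA (aL : List Char) (n : Int) :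
    List Char → Int → List Char → List Char → Option (List Char)
  | [], _, _, pt => some pt
  | ch :: rest, i, key, pt =>
    (PySem.List.pyGet? key i).bind fun kch =>          -- key[i]
    (PySem.List.index? aL kch).bind fun k =>           -- k = alpha.index(key[i])
    (PySem.List.index? aL ch).bind fun c =>            -- c = alpha.index(ch)
    (PySem.List.pyGet? aL (PySem.Int.mod ((c : Int) - (k : Int)) n)).bind fun p =>  -- alpha[(c-k)%n]
    autokeyVigDecLoopA aL n rest (i + 1) (key ++ [p]) (pt ++ [p])

def autokey_vig_dec (ct : String) (seed : String) (alpha : String) : String :=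
  let aL := alpha.toList
  let n : Int := (aL.length : Int)
  match autokeyVigDecLoopA aL n ct.toList 0 seed.toList [] with
  | some pt => String.ofList (PySem.List.slice pt none (some ((ct.toList.length : Nat) : Int)))  -- ''.join(pt[:len(ct)])
  | none => ""  -- Python raises here; excluded by Pre_

-- ===== PORT B =====
-- B's inner loop: for j in range(q+1): total += sign * alpha.index(ct[i - j*m]); sign = -sign
def akAltInner (aL ctL : List Char) (i m : Int) :
    List Int → Int × Int → Option (Int × Int)
  | [], st => some st
  | j :: js, (total, sign) =>
    (PySem.List.pyGet? ctL (i - j * m)).bind fun ch =>       -- ct[i - j*m]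
    (PySem.List.index? aL ch).bind fun c =>                  -- alpha.index(...)
    akAltInner aL ctL i m js (total + sign * (c : Int), -sign)

-- B's outer loop: for i in range(len(ct)): q, r = divmod(i, m); <inner loop>;
-- total += sign * alpha.index(seed[r]); out.append(alpha[total % n])
def akAltOuter (aL ctL seedL : List Char) (n m : Int) :
    List Int → List Char → Option (List Char)
  | [], out => some out
  | i :: is, out =>
    (PySem.Int.divmod? i m).bind fun qr =>                   -- q, r = divmod(i, m)
    (akAltInner aL ctL i m (PySem.List.pyRange 0 (qr.1 + 1) 1) (0, 1)).bind fun ts =>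
    (PySem.List.pyGet? seedL qr.2).bind fun sch =>           -- seed[r]
    (PySem.List.index? aL sch).bind fun k =>                 -- alpha.index(seed[r])
    (PySem.List.pyGet? aL (PySem.Int.mod (ts.1 + ts.2 * (k : Int)) n)).bind fun p =>  -- alpha[total % n]
    akAltOuter aL ctL seedL n m is (out ++ [p])

def autokey_vig_dec_alt (ct : String) (seed : String) (alpha : String) : String :=
  let aL := alpha.toList
  let n : Int := (aL.length : Int)
  let seedL := seed.toList
  let m : Int := (seedL.length : Int)
  let ctL := ct.toList
  match akAltOuter aL ctL seedL n m (PySem.List.pyRange 0 ((ctL.length : Nat) : Int) 1) [] with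
  | some out => String.ofList out  -- ''.join(out)
  | none => ""  -- Python raises here; excluded by Pre_

-- ===== PRECONDITION & SPEC =====
-- Pre_ excludes (i) inputs where A raises — a nonempty ct with an empty seed (IndexError) or a
-- used character absent from alpha (ValueError) — and (ii) the defensible corner of alphabets
-- with REPEATED characters, on which A's alpha.index first-occurrence canonicalization of each
-- recovered plaintext letter before feeding it back into the key is accidental.
def Pre_autokey_vig_dec (ct : String) (seed : String) (alpha : String) : Prop :=
  (ct.toList.isEmpty ||
    (!seed.toList.isEmpty &&
      decide alpha.toList.Nodup &&
      ct.toList.all (fun c => alpha.toList.contains c) &&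
      (seed.toList.take ct.toList.length).all (fun c => alpha.toList.contains c))) = true
instance (ct : String) (seed : String) (alpha : String) : Decidable (Pre_autokey_vig_dec ct seed alpha) := by
  unfold Pre_autokey_vig_dec; infer_instance

def pvWitness_autokey_vig_dec : String × String × String := ("BCCA", "CA", "ABC")

def Spec_autokey_vig_dec (ct : String) (seed : String) (alpha : String) (out : String) : Prop := out = autokey_vig_dec_alt ct seed alpha
instance (ct : String) (seed : String) (alpha : String) (out : String) : Decidable (Spec_autokey_vig_dec ct seed alpha out) := by unfold Spec_autokey_vig_dec; infer_instance

-- ===== CLAIM (what is proved, stated in full; the proofs are below) =====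
def Claim_equal_autokey_vig_dec : Prop := ∀ (ct : String) (seed : String) (alpha : String), Dom_autokey_vig_dec ct seed alpha → Pre_autokey_vig_dec ct seed alpha → Spec_autokey_vig_dec ct seed alpha (autokey_vig_dec ct seed alpha)


-- ===== LEMMAS AND PROOFS =====

-- Character indices used by both proofs: the (first-occurrence) alphabet index of ct[j] / seed[r].
def akCiN (aL ctL : List Char) (j : Nat) : Nat :=
  (PySem.List.index? aL (ctL.getD j default)).getD 0
def akSiN (aL seedL : List Char) (r : Nat) : Nat :=
  (PySem.List.index? aL (seedL.getD r default)).getD 0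

-- The intended plaintext index at position i: the autokey recurrence with step m.
def akPrec (ci si : Nat → Int) (n : Int) (m : Nat) (i : Nat) : Int :=
  if _h : 0 < m ∧ m ≤ i then PySem.Int.mod (ci i - akPrec ci si n m (i - m)) n
  else PySem.Int.mod (ci i - si (i % m))  n
termination_by i
decreasing_by omega

-- The alternating partial sum B's inner loop accumulates: q+1 ciphertext terms from the top.
def akF (ci : Nat → Int) (m : Nat) : Nat → Nat → Int
  | 0, i => ci i
  | (q+1), i => akF ci m q i + (-1)^(q+1) * ci (i - (q+1)*m)

def akP (aL ctL seedL : List Char) (i : Nat) : Int :=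
  akPrec (fun j => (akCiN aL ctL j : Int)) (fun r => (akSiN aL seedL r : Int))
    (aL.length : Int) seedL.length i

def akg (aL ctL seedL : List Char) (i : Nat) : Char :=
  aL.getD (akP aL ctL seedL i).toNat default

-- Reference formulation A's loop is reduced to: key char at step i is (seed ++ pt)[i], i = |pt|.
def akCombined (aL : List Char) (n : Int) (seedL : List Char) :
    List Char → List Char → Option (List Char)
  | pt, [] => some pt
  | pt, ch :: rest =>
    ((seedL ++ pt)[pt.length]?).bind fun kch =>
    (PySem.List.index? aL kch).bind fun k =>
    (PySem.List.index? aL ch).bind fun c =>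
    (PySem.List.pyGet? aL (PySem.Int.mod ((c : Int) - (k : Int)) n)).bind fun p =>
    akCombined aL n seedL (pt ++ [p]) rest

theorem akIndexNodup (aL : List Char) (hnd : aL.Nodup) (t : Nat) (ht : t < aL.length) :
    PySem.List.index? aL aL[t] = some t := by
  rw [PySem.List.index?_eq_idxOf?, List.idxOf?_eq_some_iff]
  exact ⟨ht, rfl, fun j hj hje => absurd (hnd.getElem_inj_iff.mp hje) (by omega)⟩

theorem akPrec_nonneg (ci si : Nat → Int) (n : Int) (hn : 0 < n) (m : Nat) (i : Nat) :
    0 ≤ akPrec ci si n m i ∧ akPrec ci si n m i < n := by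
  rw [akPrec]
  split <;> exact ⟨PySem.Int.mod_nonneg _ hn, PySem.Int.mod_lt _ hn⟩

theorem akF_flip (ci : Nat → Int) (m : Nat) (q i : Nat) :
    akF ci m (q+1) i = ci i - akF ci m q (i - m) := by
  induction q generalizing i with
  | zero => simp [akF]; ring
  | succ q ih =>
    rw [show akF ci m (q+1+1) i = akF ci m (q+1) i + (-1)^(q+2) * ci (i - (q+2)*m) from rfl,
        ih i, show akF ci m (q+1) (i-m) = akF ci m q (i-m) + (-1)^(q+1) * ci ((i-m) - (q+1)*m) from rfl,
        show (i-m) - (q+1)*m = i - (q+2)*m by rw [Nat.sub_sub]; ring_nf]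
    ring

theorem akModAbsorb (a b n : Int) (hn : 0 < n) :
    PySem.Int.mod (a - PySem.Int.mod b n) n = PySem.Int.mod (a - b) n := by
  rw [PySem.Int.mod_eq_emod_of_pos hn, PySem.Int.mod_eq_emod_of_pos hn,
      PySem.Int.mod_eq_emod_of_pos hn]
  conv_lhs => rw [Int.sub_emod]
  conv_rhs => rw [Int.sub_emod]
  rw [Int.emod_emod_of_dvd _ dvd_rfl]

theorem akPrec_eq_closed (ci si : Nat → Int) (n : Int) (hn : 0 < n) (m : Nat) (hm : 0 < m) :
    ∀ (q i : Nat), q * m ≤ i → i - q * m < m →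
      PySem.Int.mod (akF ci m q i + (-1)^(q+1) * si (i % m)) n = akPrec ci si n m i := by
  intro q
  induction q with
  | zero =>
    intro i _ hi2
    simp only [Nat.zero_mul, Nat.sub_zero] at hi2
    rw [akPrec, dif_neg (by omega)]
    simp only [akF]
    congr 1
    ring
  | succ q ih =>
    intro i h1 h2
    have hmul : (q+1)*m = q*m + m := by ring
    have hmle : m ≤ i := by omega
    have hmod : i % m = (i - m) % m := by
      conv_lhs => rw [show i = (i-m)+m by omega]
      rw [Nat.add_mod_right]
    rw [akPrec, dif_pos ⟨hm, hmle⟩, akF_flip]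
    conv_rhs => rw [← ih (i-m) (by omega) (by omega)]
    rw [akModAbsorb _ _ _ hn, ← hmod]
    congr 1
    ring

theorem akAltInner_append (aL ctL : List Char) (i m : Int) (js1 js2 : List Int) (st : Int × Int) :
    akAltInner aL ctL i m (js1 ++ js2) st
      = (akAltInner aL ctL i m js1 st).bind (akAltInner aL ctL i m js2) := by
  induction js1 generalizing st with
  | nil => simp [akAltInner]
  | cons j js ih =>
    obtain ⟨t, s⟩ := st
    simp only [List.cons_append, akAltInner]
    cases PySem.List.pyGet? ctL (i - j * m) with
    | none => simp
    | some ch =>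
      simp only [Option.bind_some]
      cases PySem.List.index? aL ch with
      | none => simp
      | some c => simp only [Option.bind_some]; exact ih _

theorem akAltInner_eq (aL ctL : List Char) (m : Nat)
    (Hc : ∀ (j : Nat) (h : j < ctL.length), PySem.List.index? aL ctL[j] = some (akCiN aL ctL j)) :
    ∀ (q i : Nat) (t s : Int), q * m ≤ i → i < ctL.length →
      akAltInner aL ctL (i : Int) (m : Int) (PySem.List.pyRange 0 ((q : Int) + 1) 1) (t, s)
        = some (t + s * akF (fun j => (akCiN aL ctL j : Int)) m q i, s * (-1)^(q+1)) := by
  intro q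
  induction q with
  | zero =>
    intro i t s _ hi
    rw [show ((0:Nat):Int) + 1 = 0 + 1 by norm_num, PySem.List.pyRange_one_singleton]
    simp only [akAltInner, zero_mul, sub_zero, PySem.List.pyGet?_natCast,
      List.getElem?_eq_getElem hi, Option.bind_some, Hc i hi]
    simp [akF, akCiN]
  | succ q ih =>
    intro i t s hq hi
    have hq' : q * m ≤ i := by
      have : (q+1)*m = q*m + m := by ring
      omega
    have hsplit : PySem.List.pyRange 0 (((q+1:Nat):Int) + 1) 1
        = PySem.List.pyRange 0 ((q:Int)+1) 1 ++ [(q:Int)+1] := by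
      push_cast
      exact PySem.List.pyRange_one_succ_right (by positivity)
    rw [hsplit, akAltInner_append, ih i t s hq' hi]
    have hidx : (i:Int) - ((q:Int)+1) * (m:Int) = ((i - (q+1)*m : Nat) : Int) := by
      rw [Nat.cast_sub hq]
      push_cast
      ring
    have hb : i - (q+1)*m < ctL.length := by omega
    simp only [Option.bind_some, akAltInner, hidx, PySem.List.pyGet?_natCast,
      List.getElem?_eq_getElem hb, Hc _ hb]
    have hgd : ctL.getD (i - (q+1)*m) default = ctL[i - (q+1)*m] := List.getD_eq_getElem _ _ hb
    simp only [akF, akCiN, hgd]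
    refine congrArg some (Prod.ext ?_ ?_) <;> simp <;> ring

theorem akAltOuter_eq (aL ctL seedL : List Char)
    (hn : 0 < aL.length) (hm : 0 < seedL.length)
    (Hc : ∀ (j : Nat) (h : j < ctL.length), PySem.List.index? aL ctL[j] = some (akCiN aL ctL j))
    (Hs : ∀ (r : Nat) (h : r < seedL.length), r < ctL.length →
      PySem.List.index? aL seedL[r] = some (akSiN aL seedL r)) :
    ∀ (k p : Nat), p + k = ctL.length →
      akAltOuter aL ctL seedL (aL.length : Int) (seedL.length : Int)
          (PySem.List.pyRange (p : Int) ((ctL.length : Nat) : Int) 1)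
          ((List.range p).map (akg aL ctL seedL))
        = some ((List.range ctL.length).map (akg aL ctL seedL)) := by
  intro k
  induction k with
  | zero =>
    intro p hp
    have hpe : p = ctL.length := by omega
    subst hpe
    rw [PySem.List.pyRange_one_eq_nil (le_refl _)]
    rfl
  | succ k ih =>
    intro p hp
    have hplt : p < ctL.length := by omega
    have hm0 : seedL ≠ [] := List.ne_nil_of_length_pos hm
    rw [PySem.List.pyRange_one_cons (by exact_mod_cast hplt)]
    simp only [akAltOuter]
    rw [show PySem.Int.divmod? (p:Int) (seedL.length:Int)
          = some (PySem.Int.floordiv (p:Int) (seedL.length:Int),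
                  PySem.Int.mod (p:Int) (seedL.length:Int)) from by
        simp [PySem.Int.divmod?, hm0, PySem.Int.floordiv, PySem.Int.mod]]
    simp only [Option.bind_some, PySem.Int.floordiv_natCast, PySem.Int.mod_natCast]
    rw [akAltInner_eq aL ctL seedL.length Hc (p / seedL.length) p 0 1
          (Nat.div_mul_le_self p _) hplt]
    have hr : p % seedL.length < seedL.length := Nat.mod_lt _ hm
    have hrct : p % seedL.length < ctL.length := lt_of_le_of_lt (Nat.mod_le _ _) hplt
    simp only [Option.bind_some, PySem.List.pyGet?_natCast, List.getElem?_eq_getElem hr,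
      Hs _ hr hrct]
    have hdm := Nat.div_add_mod p seedL.length
    have hmc : (p / seedL.length) * seedL.length = seedL.length * (p / seedL.length) :=
      Nat.mul_comm _ _
    have hclosed := akPrec_eq_closed (fun j => (akCiN aL ctL j : Int))
      (fun r => (akSiN aL seedL r : Int)) (aL.length : Int) (by exact_mod_cast hn)
      seedL.length hm (p / seedL.length) p (Nat.div_mul_le_self p _) (by omega)
    have harg : (0 + 1 * akF (fun j => (akCiN aL ctL j : Int)) seedL.length (p / seedL.length) p)
        + 1 * (-1:Int)^(p / seedL.length + 1) * ((akSiN aL seedL (p % seedL.length) : Nat) : Int)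
        = akF (fun j => (akCiN aL ctL j : Int)) seedL.length (p / seedL.length) p
          + (-1:Int)^(p / seedL.length + 1) * ((akSiN aL seedL (p % seedL.length) : Nat) : Int) := by
      ring
    rw [harg, hclosed]
    have hb := akPrec_nonneg (fun j => (akCiN aL ctL j : Int))
      (fun r => (akSiN aL seedL r : Int)) (aL.length : Int) (by exact_mod_cast hn)
      seedL.length p
    have hToNat : (akPrec (fun j => (akCiN aL ctL j : Int)) (fun r => (akSiN aL seedL r : Int))
        (aL.length : Int) seedL.length p).toNat < aL.length := by omega
    rw [PySem.List.pyGet?_of_nonneg _ hb.1, List.getElem?_eq_getElem hToNat]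
    simp only [Option.bind_some]
    have hout : (List.range p).map (akg aL ctL seedL)
          ++ [(aL[(akPrec (fun j => (akCiN aL ctL j : Int)) (fun r => (akSiN aL seedL r : Int))
              (aL.length : Int) seedL.length p).toNat])]
        = (List.range (p+1)).map (akg aL ctL seedL) := by
      rw [List.range_succ, List.map_append]
      simp [akg, akP, List.getD_eq_getElem?_getD, List.getElem?_eq_getElem hToNat]
    rw [hout]
    have := ih (p+1) (by omega)
    rw [show ((p:Int) + 1) = (((p+1 : Nat) : Nat) : Int) by push_cast; ring]
    exact this
theorem akBridgeA (aL : List Char) (n : Int) (seedL : List Char) :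
    ∀ (rest pt : List Char),
      autokeyVigDecLoopA aL n rest ((pt.length : Nat) : Int) (seedL ++ pt) pt =
        akCombined aL n seedL pt rest := by
  intro rest
  induction rest with
  | nil => intro pt; rfl
  | cons ch rest ih =>
    intro pt
    simp only [autokeyVigDecLoopA, akCombined, PySem.List.pyGet?_natCast]
    cases hk : (seedL ++ pt)[pt.length]? with
    | none => rfl
    | some kch =>
      simp only [Option.bind_some]
      cases h1 : PySem.List.index? aL kch with
      | none => rfl
      | some k =>
        simp only [Option.bind_some]
        cases h2 : PySem.List.index? aL ch with
        | none => rfl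
        | some c =>
          simp only [Option.bind_some]
          cases h3 : PySem.List.pyGet? aL (PySem.Int.mod ((c : Int) - (k : Int)) n) with
          | none => rfl
          | some p =>
            simp only [Option.bind_some]
            have hcast : ((pt.length : Nat) : Int) + 1 = (((pt ++ [p]).length : Nat) : Int) := by
              simp
            have happ : (seedL ++ pt) ++ [p] = seedL ++ (pt ++ [p]) := by simp
            rw [hcast, happ]
            exact ih (pt ++ [p])

theorem akCombined_eq (aL ctL seedL : List Char)
    (hnd : aL.Nodup) (hn : 0 < aL.length) (hm : 0 < seedL.length)
    (Hc : ∀ (j : Nat) (h : j < ctL.length), PySem.List.index? aL ctL[j] = some (akCiN aL ctL j))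
    (Hs : ∀ (r : Nat) (h : r < seedL.length), r < ctL.length →
      PySem.List.index? aL seedL[r] = some (akSiN aL seedL r)) :
    ∀ (k p : Nat), p + k = ctL.length →
      akCombined aL (aL.length : Int) seedL ((List.range p).map (akg aL ctL seedL)) (ctL.drop p)
        = some ((List.range ctL.length).map (akg aL ctL seedL)) := by
  intro k
  induction k with
  | zero =>
    intro p hp
    have hpe : p = ctL.length := by omega
    subst hpe
    rw [List.drop_of_length_le (le_refl _)]
    rfl
  | succ k ih =>
    intro p hp
    have hplt : p < ctL.length := by omega
    rw [List.drop_eq_getElem_cons hplt]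
    simp only [akCombined, List.length_map, List.length_range]
    have hkch : (seedL ++ (List.range p).map (akg aL ctL seedL))[p]?
        = if hlt : p < seedL.length then some seedL[p]
          else some (akg aL ctL seedL (p - seedL.length)) := by
      split
      · next hlt => rw [List.getElem?_append_left hlt, List.getElem?_eq_getElem hlt]
      · next hge =>
        rw [List.getElem?_append_right (by simpa using not_lt.mp hge)]
        simp only [List.getElem?_map]
        rw [List.getElem?_range (by omega)]
        rfl
    rw [hkch]
    have hnI : (0:Int) < (aL.length : Int) := by exact_mod_cast hn
    have hbp := akPrec_nonneg (fun j => (akCiN aL ctL j : Int))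
      (fun r => (akSiN aL seedL r : Int)) (aL.length : Int) hnI seedL.length p
    have hToNat : (akPrec (fun j => (akCiN aL ctL j : Int)) (fun r => (akSiN aL seedL r : Int))
        (aL.length : Int) seedL.length p).toNat < aL.length := by omega
    have hout : (List.range p).map (akg aL ctL seedL)
          ++ [(aL[(akPrec (fun j => (akCiN aL ctL j : Int)) (fun r => (akSiN aL seedL r : Int))
              (aL.length : Int) seedL.length p).toNat])]
        = (List.range (p+1)).map (akg aL ctL seedL) := by
      rw [List.range_succ, List.map_append]
      simp [akg, akP, List.getD_eq_getElem?_getD, List.getElem?_eq_getElem hToNat]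
    by_cases hlt : p < seedL.length
    · rw [dif_pos hlt]
      simp only [Option.bind_some, Hs p hlt hplt, Hc p hplt]
      have hgoal : PySem.Int.mod ((akCiN aL ctL p : Int) - (akSiN aL seedL p : Int))
          (aL.length : Int) = akPrec (fun j => (akCiN aL ctL j : Int))
            (fun r => (akSiN aL seedL r : Int)) (aL.length : Int) seedL.length p := by
        rw [akPrec, dif_neg (by omega), Nat.mod_eq_of_lt hlt]
      rw [hgoal, PySem.List.pyGet?_of_nonneg _ hbp.1, List.getElem?_eq_getElem hToNat]
      simp only [Option.bind_some]
      rw [hout]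
      exact ih (p+1) (by omega)
    · rw [dif_neg hlt]
      have hge : seedL.length ≤ p := not_lt.mp hlt
      have hbq := akPrec_nonneg (fun j => (akCiN aL ctL j : Int))
        (fun r => (akSiN aL seedL r : Int)) (aL.length : Int) hnI seedL.length (p - seedL.length)
      have hToNatq : (akPrec (fun j => (akCiN aL ctL j : Int)) (fun r => (akSiN aL seedL r : Int))
          (aL.length : Int) seedL.length (p - seedL.length)).toNat < aL.length := by omega
      have hgch : akg aL ctL seedL (p - seedL.length)
          = aL[(akPrec (fun j => (akCiN aL ctL j : Int)) (fun r => (akSiN aL seedL r : Int))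
              (aL.length : Int) seedL.length (p - seedL.length)).toNat] := by
        simp [akg, akP, List.getD_eq_getElem?_getD, List.getElem?_eq_getElem hToNatq]
      rw [hgch]
      simp only [Option.bind_some, akIndexNodup aL hnd _ hToNatq, Hc p hplt]
      have hcastq : (((akPrec (fun j => (akCiN aL ctL j : Int)) (fun r => (akSiN aL seedL r : Int))
          (aL.length : Int) seedL.length (p - seedL.length)).toNat : Nat) : Int)
          = akPrec (fun j => (akCiN aL ctL j : Int)) (fun r => (akSiN aL seedL r : Int))
            (aL.length : Int) seedL.length (p - seedL.length) := Int.toNat_of_nonneg hbq.1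
      rw [hcastq]
      have hgoal : PySem.Int.mod ((akCiN aL ctL p : Int)
            - akPrec (fun j => (akCiN aL ctL j : Int)) (fun r => (akSiN aL seedL r : Int))
              (aL.length : Int) seedL.length (p - seedL.length)) (aL.length : Int)
          = akPrec (fun j => (akCiN aL ctL j : Int)) (fun r => (akSiN aL seedL r : Int))
            (aL.length : Int) seedL.length p := by
        conv_rhs => rw [akPrec, dif_pos ⟨hm, hge⟩]
      rw [hgoal, PySem.List.pyGet?_of_nonneg _ hbp.1, List.getElem?_eq_getElem hToNat]
      simp only [Option.bind_some]
      rw [hout]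
      exact ih (p+1) (by omega)

theorem akIndexMem (aL xs : List Char) (j : Nat) (h : j < xs.length) (hmem : xs[j] ∈ aL) :
    PySem.List.index? aL xs[j] = some (akCiN aL xs j) := by
  have hgd : xs.getD j default = xs[j] := by
    rw [List.getD_eq_getElem?_getD, List.getElem?_eq_getElem h]
    rfl
  rw [akCiN, hgd]
  cases heq : PySem.List.index? aL xs[j] with
  | none => rw [PySem.List.index?_eq_none_iff] at heq; exact absurd hmem heq
  | some k => rfl

-- ===== VERDICT (by name: the statement is the Claim_ definition above) =====
theorem autokey_vig_dec_spec : Claim_equal_autokey_vig_dec := by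
  intro ct seed alpha _ hpre
  unfold Spec_autokey_vig_dec autokey_vig_dec autokey_vig_dec_alt
  by_cases hct : ct.toList = []
  · simp only [hct]
    rfl
  · unfold Pre_autokey_vig_dec at hpre
    rw [Bool.or_eq_true, List.isEmpty_iff] at hpre
    rcases hpre with h | hpre
    · exact absurd h hct
    simp only [Bool.and_eq_true, decide_eq_true_eq, List.all_eq_true] at hpre
    obtain ⟨⟨⟨hseedne, hnd⟩, hcall⟩, hsall⟩ := hpre
    have hm : 0 < seed.toList.length := by
      cases hs : seed.toList with
      | nil => rw [hs] at hseedne; simp at hseedne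
      | cons a l => simp
    obtain ⟨c0, hc0⟩ := List.exists_mem_of_ne_nil ct.toList hct
    have hn : 0 < alpha.toList.length :=
      List.length_pos_of_mem (List.contains_iff_mem.mp (hcall c0 hc0))
    have Hc : ∀ (j : Nat) (h : j < ct.toList.length),
        PySem.List.index? alpha.toList ct.toList[j] = some (akCiN alpha.toList ct.toList j) :=
      fun j h => akIndexMem _ _ _ h
        (List.contains_iff_mem.mp (hcall _ (List.getElem_mem h)))
    have Hs : ∀ (r : Nat) (h : r < seed.toList.length), r < ct.toList.length →
        PySem.List.index? alpha.toList seed.toList[r] = some (akSiN alpha.toList seed.toList r) := by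
      intro r h hrct
      have htk : (seed.toList.take ct.toList.length)[r]'(by rw [List.length_take]; omega) = seed.toList[r] :=
        List.getElem_take
      have hmem : seed.toList[r] ∈ alpha.toList := by
        rw [← htk]
        exact List.contains_iff_mem.mp (hsall _ (List.getElem_mem _))
      exact akIndexMem _ _ _ h hmem
    have hA := akBridgeA alpha.toList (alpha.toList.length : Int) seed.toList ct.toList []
    simp only [List.length_nil, Nat.cast_zero, List.append_nil] at hA
    have hC := akCombined_eq alpha.toList ct.toList seed.toList hnd hn hm Hc Hs
      ct.toList.length 0 (by simp)
    simp only [List.range_zero, List.map_nil, List.drop_zero] at hC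
    have hO := akAltOuter_eq alpha.toList ct.toList seed.toList hn hm Hc Hs
      ct.toList.length 0 (by simp)
    simp only [Nat.cast_zero, List.range_zero, List.map_nil] at hO
    simp only [hA, hC, hO]
    rw [PySem.List.slice_to_natCast, List.take_of_length_le (by simp)]
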